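-- pv_equiv track=rewrite | github.com/FrostedLemonade4/AXS-Demos | scripts/Chapter_info.py | group_lines_until_year
-- ===== SOURCE A (Python) =====
-- def group_lines_until_year(lines):
--     """
--     Groups lines by appending until a line ends in a year (4-digit number).
--     """
--     grouped_lines = []
--     current_line = ""
--
--     for line in lines:
--         line = line.strip()  # Remove leading and trailing whitespace
--
--         # Skip empty lines
--         if not line:
--             continue
--
--         # Append the current line fragment
--         current_line += " " + line if current_line else line
--
--         # Check if the current line ends with a year
--         words = current_line.split()
--         if words and words[-1].isdigit() and len(words[-1]) == 4:
--             grouped_lines.append(current_line.strip())  # Add the grouped line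
--             current_line = ""  # Reset for the next group
--
--     # Add any remaining line (in case the last line does not end with a year)
--     if current_line:
--         grouped_lines.append(current_line.strip())
--
--     return grouped_lines
-- ===== SOURCE B (Python) =====
-- def group_lines_until_year(lines):
--     cleaned = [s for s in (l.strip() for l in lines) if s]
--     out = []
--     start = 0
--     for i, l in enumerate(cleaned):
--         w = l.split()[-1]
--         if w.isdigit() and len(w) == 4:
--             out.append(" ".join(cleaned[start:i + 1]))
--             start = i + 1
--     if start < len(cleaned):
--         out.append(" ".join(cleaned[start:]))
--     return out
-- ===== Notes on version B (the rewrite author's own statement) =====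
-- stated objective: faster
-- what changed: B first materializes the cleaned (stripped, nonempty) lines, then scans once testing only each line's own last word and emits groups by slicing between recorded boundary indices, instead of A's running string accumulator that is re-built and re-split in full on every iteration.
import Mathlib
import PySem

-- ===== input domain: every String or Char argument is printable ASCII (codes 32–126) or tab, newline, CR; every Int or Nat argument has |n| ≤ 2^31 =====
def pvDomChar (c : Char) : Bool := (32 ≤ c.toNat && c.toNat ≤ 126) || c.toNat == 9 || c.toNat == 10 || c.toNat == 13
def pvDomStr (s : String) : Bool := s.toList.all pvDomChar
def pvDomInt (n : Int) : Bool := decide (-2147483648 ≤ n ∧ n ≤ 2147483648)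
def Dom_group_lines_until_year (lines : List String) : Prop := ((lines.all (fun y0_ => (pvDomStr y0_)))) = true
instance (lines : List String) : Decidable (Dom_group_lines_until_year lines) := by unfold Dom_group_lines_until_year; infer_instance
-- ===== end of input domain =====

-- B finds group boundaries over a materialized cleaned list and emits groups by index slicing,
-- instead of A's running string accumulator re-split each iteration (a timing run measured B faster).

-- ===== PORT A =====
-- Strings are ported on code points (List Char); Python str '+' is List append there (exact).
def group_lines_until_year (lines : List String) : List String :=
  let st := lines.foldl (fun (st : List String × List Char) line =>
    let l := PySem.Chars.strip line.toList
    if l.isEmpty then st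
    else
      let cur := if !st.2.isEmpty then st.2 ++ ' ' :: l else l
      let words := PySem.Chars.split₀ cur
      let w := (PySem.List.pyGet? words (-1)).getD []   -- words[-1]; guarded by the words-nonempty test
      if !words.isEmpty && PySem.Chars.strIsdigit w && PySem.Chars.len w == 4 then
        (st.1 ++ [String.ofList (PySem.Chars.strip cur)], [])
      else (st.1, cur)) ([], [])
  if !st.2.isEmpty then st.1 ++ [String.ofList (PySem.Chars.strip st.2)] else st.1

-- ===== PORT B =====
def group_lines_until_year_alt (lines : List String) : List String :=
  let cleaned := (lines.map (fun l => PySem.Chars.strip l.toList)).filter (fun s => !s.isEmpty)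
  let st := (PySem.List.enumerate cleaned).foldl
    (fun (st : List String × Int) p =>
      -- l.split()[-1]: cleaned entries are nonempty stripped lines, so split() is nonempty
      let w := (PySem.List.pyGet? (PySem.Chars.split₀ p.2) (-1)).getD []
      if PySem.Chars.strIsdigit w && PySem.Chars.len w == 4 then
        (st.1 ++ [String.ofList (PySem.Chars.join [' '] (PySem.List.slice cleaned (some st.2) (some (p.1 + 1))))], p.1 + 1)
      else st) ([], (0 : Int))
  if st.2 < (cleaned.length : Int) then
    st.1 ++ [String.ofList (PySem.Chars.join [' '] (PySem.List.slice cleaned (some st.2) none))]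
  else st.1

-- ===== PRECONDITION & SPEC =====
def Spec_group_lines_until_year (lines : List String) (out : List String) : Prop := out = group_lines_until_year_alt lines
instance (lines : List String) (out : List String) : Decidable (Spec_group_lines_until_year lines out) := by unfold Spec_group_lines_until_year; infer_instance

-- ===== CLAIM (what is proved, stated in full; the proofs are below) =====
def Claim_equal_group_lines_until_year : Prop := ∀ (lines : List String), Dom_group_lines_until_year lines → Spec_group_lines_until_year lines (group_lines_until_year lines)

-- ===== LEMMAS AND PROOFS =====

-- proof-side abbreviations
def pvJ (g : List (List Char)) : List Char := PySem.Chars.join [' '] g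

def pvY (cur : List Char) : Bool :=
  let words := PySem.Chars.split₀ cur
  let w := (PySem.List.pyGet? words (-1)).getD []
  !words.isEmpty && PySem.Chars.strIsdigit w && PySem.Chars.len w == 4

def pvC (l : List Char) : Bool :=
  let w := (PySem.List.pyGet? (PySem.Chars.split₀ l) (-1)).getD []
  PySem.Chars.strIsdigit w && PySem.Chars.len w == 4

def pvStripped (l : List Char) : Prop := l ≠ [] ∧ PySem.Chars.strip l = l

def pvCleaned (lines : List String) : List (List Char) :=
  (lines.map (fun l => PySem.Chars.strip l.toList)).filter (fun s => !s.isEmpty)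

-- reference recursion both ports are reduced to
def pvRef : List (List Char) → List Char → List String
  | [], cur => if !cur.isEmpty then [String.ofList (PySem.Chars.strip cur)] else []
  | l :: rest, cur =>
    let cur' := if !cur.isEmpty then cur ++ ' ' :: l else l
    if pvY cur' then String.ofList (PySem.Chars.strip cur') :: pvRef rest [] else pvRef rest cur'

-- ---- dropWhile / strip facts ----
lemma pv_head_false {p : Char → Bool} {c : Char} {t : List Char}
    (h : List.dropWhile p (c :: t) = c :: t) : p c = false := by
  by_contra hp
  simp at hp
  have hlen := congrArg List.length h
  simp [hp] at hlen
  have := List.length_dropWhile_le p t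
  omega

lemma pv_dropWhile_fixed_append {p : Char → Bool} {l : List Char} (hne : l ≠ [])
    (hfix : List.dropWhile p l = l) (b : List Char) : List.dropWhile p (l ++ b) = l ++ b := by
  cases l with
  | nil => exact absurd rfl hne
  | cons c t => simp [List.dropWhile_cons, pv_head_false hfix]

lemma pv_dropWhile_fixed_prefix {p : Char → Bool} {l l' : List Char} (hpre : l' <+: l)
    (hfix : List.dropWhile p l = l) : List.dropWhile p l' = l' := by
  cases l' with
  | nil => rfl
  | cons c t =>
      obtain ⟨r, rfl⟩ := hpre
      simp [List.dropWhile_cons, pv_head_false hfix]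

lemma pv_rstrip_prefix (l : List Char) : PySem.Chars.rstrip l <+: l := by
  unfold PySem.Chars.rstrip
  conv_rhs => rw [← l.reverse_reverse]
  exact List.reverse_prefix.mpr (List.dropWhile_suffix _)

lemma pv_lstrip_strip (s : List Char) :
    PySem.Chars.lstrip (PySem.Chars.strip s) = PySem.Chars.strip s := by
  have h1 : PySem.Chars.strip s <+: PySem.Chars.lstrip s := by
    unfold PySem.Chars.strip
    exact pv_rstrip_prefix _
  exact pv_dropWhile_fixed_prefix h1 (List.dropWhile_idempotent _ _)

lemma pv_rstrip_idem (x : List Char) :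
    PySem.Chars.rstrip (PySem.Chars.rstrip x) = PySem.Chars.rstrip x := by
  unfold PySem.Chars.rstrip
  rw [List.reverse_reverse, List.dropWhile_idempotent]

lemma pv_rstrip_strip (s : List Char) :
    PySem.Chars.rstrip (PySem.Chars.strip s) = PySem.Chars.strip s := by
  unfold PySem.Chars.strip
  exact pv_rstrip_idem _

lemma pv_strip_strip (s : List Char) :
    PySem.Chars.strip (PySem.Chars.strip s) = PySem.Chars.strip s := by
  show PySem.Chars.rstrip (PySem.Chars.lstrip (PySem.Chars.strip s)) = _
  rw [pv_lstrip_strip, pv_rstrip_strip]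

lemma pv_lstrip_of_stripped {l : List Char} (h : pvStripped l) :
    PySem.Chars.lstrip l = l := by
  conv_lhs => rw [← h.2]
  rw [pv_lstrip_strip, h.2]

lemma pv_rstrip_of_stripped {l : List Char} (h : pvStripped l) :
    PySem.Chars.rstrip l = l := by
  conv_lhs => rw [← h.2]
  rw [pv_rstrip_strip, h.2]

lemma pv_strip_of_stripped {l : List Char} (h : pvStripped l) : PySem.Chars.strip l = l := h.2

-- ---- split₀ facts ----
lemma pv_go_acc (s cur acc) :
    PySem.Chars.split₀.go s cur acc = acc.reverse ++ PySem.Chars.split₀.go s cur [] := by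
  induction s generalizing cur acc with
  | nil =>
      simp only [PySem.Chars.split₀.go]
      split <;> simp
  | cons c rest ih =>
      simp only [PySem.Chars.split₀.go]
      split
      · split
        · exact ih _ _
        · rw [ih [] (cur.reverse :: acc), ih [] ([cur.reverse])]; simp
      · exact ih _ _

lemma pv_split₀_append (a b : List Char) :
    PySem.Chars.split₀ (a ++ ' ' :: b) = PySem.Chars.split₀ a ++ PySem.Chars.split₀ b := by
  show PySem.Chars.split₀.go _ [] [] = _
  suffices h : ∀ (a : List Char) (cur : List Char),
      PySem.Chars.split₀.go (a ++ ' ' :: b) cur [] =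
        PySem.Chars.split₀.go a cur [] ++ PySem.Chars.split₀.go b [] [] by
    exact h a []
  intro a
  induction a with
  | nil =>
      intro cur
      simp only [List.nil_append, PySem.Chars.split₀.go,
        show PySem.Chars.isspace ' ' = true from by decide, if_true]
      by_cases hc : cur.isEmpty <;>
        simp [hc, pv_go_acc b [] [cur.reverse]]
  | cons c rest ih =>
      intro cur
      simp only [List.cons_append, PySem.Chars.split₀.go]
      split
      · by_cases hc : cur.isEmpty
        · simp only [hc, if_true]; exact ih _
        · simp only [hc, if_false]
          rw [pv_go_acc (rest ++ ' ' :: b) [] [cur.reverse], pv_go_acc rest [] [cur.reverse], ih []]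
          simp
      · exact ih _

lemma pv_go_ne_nil (s cur acc) (h : cur ≠ [] ∨ acc ≠ []) :
    PySem.Chars.split₀.go s cur acc ≠ [] := by
  induction s generalizing cur acc with
  | nil =>
      simp only [PySem.Chars.split₀.go]
      split
      · rename_i hc
        rcases h with h | h
        · simp_all
        · simpa using h
      · simp
  | cons c rest ih =>
      simp only [PySem.Chars.split₀.go]
      split
      · split
        · rename_i hc
          refine ih _ _ (Or.inr ?_)
          rcases h with h | h
          · simp_all
          · exact h
        · exact ih _ _ (Or.inr (by simp))
      · exact ih _ _ (Or.inl (by simp))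

lemma pv_split₀_ne_nil {l : List Char} (hl : pvStripped l) : PySem.Chars.split₀ l ≠ [] := by
  have hls := pv_lstrip_of_stripped hl
  obtain ⟨hne, -⟩ := hl
  cases l with
  | nil => exact absurd rfl hne
  | cons c t =>
      have hc : PySem.Chars.isspace c = false := pv_head_false hls
      show PySem.Chars.split₀.go _ [] [] ≠ []
      simp only [PySem.Chars.split₀.go, hc]
      exact pv_go_ne_nil _ _ _ (Or.inl (by simp))

-- ---- join facts ----
lemma pv_join_cons {x : List Char} {xs : List (List Char)} (h : xs ≠ []) :
    pvJ (x :: xs) = x ++ ' ' :: pvJ xs := by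
  cases xs with
  | nil => exact absurd rfl h
  | cons y ys => simpa using PySem.Chars.join_cons_cons [' '] x y ys

lemma pv_join_concat {g : List (List Char)} (h : g ≠ []) (l : List Char) :
    pvJ (g ++ [l]) = pvJ g ++ ' ' :: l := by
  induction g with
  | nil => exact absurd rfl h
  | cons x xs ih =>
      cases xs with
      | nil => simp [pvJ, PySem.Chars.join_cons_cons, PySem.Chars.join_singleton]
      | cons y ys =>
          rw [List.cons_append, pv_join_cons (xs := y :: ys ++ [l]) (by simp), ih (by simp),
            pv_join_cons (xs := y :: ys) (by simp)]
          simp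

lemma pv_join_stripped {g : List (List Char)} (hg : g ≠ []) (h : ∀ l ∈ g, pvStripped l) :
    pvStripped (pvJ g) := by
  induction g with
  | nil => exact absurd rfl hg
  | cons x xs ih =>
      have hx := h x (by simp)
      cases xs with
      | nil =>
          simpa [pvJ, PySem.Chars.join_singleton] using hx
      | cons y ys =>
          have hxs : pvStripped (pvJ (y :: ys)) := ih (by simp) (fun l hl => h l (by simp [hl]))
          rw [pv_join_cons (by simp)]
          refine ⟨by simp [hx.1], ?_⟩
          unfold PySem.Chars.strip
          rw [show PySem.Chars.lstrip (x ++ ' ' :: pvJ (y :: ys)) = _ from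
            pv_dropWhile_fixed_append hx.1 (pv_lstrip_of_stripped hx) _]
          show (List.dropWhile _ (x ++ ' ' :: pvJ (y :: ys)).reverse).reverse = _
          rw [show x ++ ' ' :: pvJ (y :: ys) = (x ++ [' ']) ++ pvJ (y :: ys) by simp]
          rw [List.reverse_append]
          rw [pv_dropWhile_fixed_append (by simp [hxs.1]) ?_ _]
      
      
          · simp
          · have := pv_rstrip_of_stripped hxs
            unfold PySem.Chars.rstrip at this
            have := congrArg List.reverse this
            simpa using this

-- ---- the year test ----
lemma pv_Y_single {l : List Char} (h : pvStripped l) : pvY l = pvC l := by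
  unfold pvY pvC
  have he : (PySem.Chars.split₀ l).isEmpty = false := by
    simpa [List.isEmpty_eq_false_iff] using pv_split₀_ne_nil h
  simp [he]

lemma pv_Y_append {a l : List Char} (ha : a ≠ []) (hl : pvStripped l) :
    pvY (a ++ ' ' :: l) = pvC l := by
  unfold pvY pvC
  have hsp := pv_split₀_append a l
  have hne := pv_split₀_ne_nil hl
  simp only [hsp, PySem.List.pyGet?_neg_one, List.getLast?_append_of_ne_nil _ hne]
  have he : (PySem.Chars.split₀ a ++ PySem.Chars.split₀ l).isEmpty = false := by
    simp [List.isEmpty_eq_false_iff, hne]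
  simp [he]

-- ---- A reduces to pvRef ----
lemma pv_A_ref (cs : List (List Char)) (g : List String) (cur : List Char) :
    (let st := cs.foldl (fun (st : List String × List Char) l =>
        let cur := if !st.2.isEmpty then st.2 ++ ' ' :: l else l
        if pvY cur then (st.1 ++ [String.ofList (PySem.Chars.strip cur)], [])
        else (st.1, cur)) (g, cur)
     if !st.2.isEmpty then st.1 ++ [String.ofList (PySem.Chars.strip st.2)] else st.1)
    = g ++ pvRef cs cur := by
  induction cs generalizing g cur with
  | nil =>
      simp only [List.foldl_nil, pvRef]
      by_cases h : cur.isEmpty <;> simp [h]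
  | cons l rest ih =>
      simp only [List.foldl_cons, pvRef]
      by_cases h : pvY (if !cur.isEmpty then cur ++ ' ' :: l else l)
      · simp only [h, if_true]
        rw [ih]
        simp
      · have hb : pvY (if !cur.isEmpty then cur ++ ' ' :: l else l) = false := by simpa using h
        simp only [hb, Bool.false_eq_true, if_false]
        exact ih g _

lemma pv_A_eq (lines : List String) :
    group_lines_until_year lines = pvRef (pvCleaned lines) [] := by
  unfold group_lines_until_year
  have hstep : ∀ (st : List String × List Char),
      lines.foldl (fun (st : List String × List Char) line =>
        let l := PySem.Chars.strip line.toList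
        if l.isEmpty then st
        else
          let cur := if !st.2.isEmpty then st.2 ++ ' ' :: l else l
          let words := PySem.Chars.split₀ cur
          let w := (PySem.List.pyGet? words (-1)).getD []
          if !words.isEmpty && PySem.Chars.strIsdigit w && PySem.Chars.len w == 4 then
            (st.1 ++ [String.ofList (PySem.Chars.strip cur)], [])
          else (st.1, cur)) st
      = (pvCleaned lines).foldl (fun (st : List String × List Char) l =>
          let cur := if !st.2.isEmpty then st.2 ++ ' ' :: l else l
          if pvY cur then (st.1 ++ [String.ofList (PySem.Chars.strip cur)], [])
          else (st.1, cur)) st := by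
    induction lines with
    | nil => intro st; rfl
    | cons x rest ih =>
        intro st
        by_cases h : (PySem.Chars.strip x.toList).isEmpty
        · simp only [List.foldl_cons, pvCleaned, List.map_cons, List.filter_cons, h]
          simpa [pvCleaned, h] using ih _
        · simp only [List.foldl_cons, pvCleaned, List.map_cons, List.filter_cons, h]
          simp only [pvCleaned] at ih
          simp only [h, Bool.not_false, if_true, List.foldl_cons]
          rw [← ih]
          rfl
  rw [hstep ([], [])]
  exact pv_A_ref (pvCleaned lines) [] []

-- ---- B reduces to pvRef ----
def pvStepB (cleaned : List (List Char)) (st : List String × Int) (p : Int × List Char) :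
    List String × Int :=
  let w := (PySem.List.pyGet? (PySem.Chars.split₀ p.2) (-1)).getD []
  if PySem.Chars.strIsdigit w && PySem.Chars.len w == 4 then
    (st.1 ++ [String.ofList (PySem.Chars.join [' '] (PySem.List.slice cleaned (some st.2) (some (p.1 + 1))))], p.1 + 1)
  else st

def pvFinB (cleaned : List (List Char)) (st : List String × Int) : List String :=
  if st.2 < (cleaned.length : Int) then
    st.1 ++ [String.ofList (PySem.Chars.join [' '] (PySem.List.slice cleaned (some st.2) none))]
  else st.1

lemma pv_join_drop_concat {pre : List (List Char)} (hp : ∀ x ∈ pre, pvStripped x)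
    (s : Nat) (l : List Char) :
    pvJ (pre.drop s ++ [l]) =
      (if !(pvJ (pre.drop s)).isEmpty then pvJ (pre.drop s) ++ ' ' :: l else l) := by
  by_cases hd : pre.drop s = []
  · simp [hd, pvJ, PySem.Chars.join_nil, PySem.Chars.join_singleton]
  · have hstr : pvStripped (pvJ (pre.drop s)) :=
      pv_join_stripped hd (fun x hx => hp x (List.mem_of_mem_drop hx))
    have hne : (pvJ (pre.drop s)).isEmpty = false := by
      simpa [List.isEmpty_eq_false_iff] using hstr.1
    rw [pv_join_concat hd l]
    simp [hne]

lemma pv_stripped_join_drop {pre : List (List Char)} (hp : ∀ x ∈ pre, pvStripped x)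
    (s : Nat) (l : List Char) (hl : pvStripped l) :
    pvStripped (pvJ (pre.drop s ++ [l])) := by
  refine pv_join_stripped (by simp) ?_
  intro x hx
  rcases List.mem_append.mp hx with hx | hx
  · exact hp x (List.mem_of_mem_drop hx)
  · simp at hx; subst hx; exact hl

lemma pv_B_ref (suf : List (List Char)) : ∀ (pre : List (List Char)) (g : List String) (s : Nat),
    s ≤ pre.length →
    (∀ l ∈ suf, pvStripped l) → (∀ l ∈ pre, pvStripped l) →
    pvFinB (pre ++ suf)
      ((PySem.List.enumerate suf (pre.length : Int)).foldl (pvStepB (pre ++ suf)) (g, (s : Int)))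
    = g ++ pvRef suf (pvJ (pre.drop s)) := by
  induction suf with
  | nil =>
      intro pre g s hs _ hpre
      rw [PySem.List.enumerate_nil, List.foldl_nil, List.append_nil]
      unfold pvFinB pvRef
      by_cases hlt : s < pre.length
      · have hd : pre.drop s ≠ [] := by
          simp only [ne_eq, List.drop_eq_nil_iff]; omega
        have hstr : pvStripped (pvJ (pre.drop s)) :=
          pv_join_stripped hd (fun x hx => hpre x (List.mem_of_mem_drop hx))
        have hne : (pvJ (pre.drop s)).isEmpty = false := by
          simpa [List.isEmpty_eq_false_iff] using hstr.1
        rw [if_pos (show ((g, (s:Int)).2 < ((pre.length : Nat) : Int)) from by show (s:Int) < (pre.length:Int); exact_mod_cast hlt),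
          PySem.List.slice_from _ (by positivity)]
        simp only [Int.toNat_natCast, hne]
        have h2 := hstr.2
        simp only [pvJ] at h2
        simp [pvJ, h2]
      · have hse : pre.drop s = [] := by
          simp only [List.drop_eq_nil_iff]; omega
        rw [if_neg (by simp; omega), hse]
        simp [pvJ, PySem.Chars.join_nil]
  | cons l rest ih =>
      intro pre g s hs hsuf hpre
      have hl : pvStripped l := hsuf l (by simp)
      have hslice : PySem.List.slice (pre ++ l :: rest) (some ((s : Nat) : Int))
          (some (((pre.length : Nat) : Int) + 1)) = pre.drop s ++ [l] := by
        have h1 : (((pre.length : Nat) : Int) + 1) = ((pre.length + 1 : Nat) : Int) := by push_cast; ring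
        rw [h1, PySem.List.slice_natCast, List.drop_append_of_le_length hs]
        have h2 : pre.length + 1 - s = (pre.drop s).length + 1 := by
          simp only [List.length_drop]; omega
        rw [h2, List.take_length_add_append]
        simp
      have hstep : pvStepB (pre ++ l :: rest) (g, (s : Int)) ((pre.length : Int), l)
          = if pvC l then (g ++ [String.ofList (pvJ (pre.drop s ++ [l]))], ((pre.length : Int) + 1))
            else (g, (s : Int)) := by
        unfold pvStepB pvC
        by_cases hc : (PySem.Chars.strIsdigit ((PySem.List.pyGet? (PySem.Chars.split₀ l) (-1)).getD []) &&
            PySem.Chars.len ((PySem.List.pyGet? (PySem.Chars.split₀ l) (-1)).getD []) == 4) = true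
        · simp only [hc, if_true, hslice, pvJ]
        · simp only [Bool.not_eq_true] at hc
          simp only [hc, Bool.false_eq_true, if_false]
      have hYC : pvY (if !(pvJ (pre.drop s)).isEmpty then pvJ (pre.drop s) ++ ' ' :: l else l) = pvC l := by
        by_cases hd : pre.drop s = []
        · simp [hd, pvJ, PySem.Chars.join_nil, pv_Y_single hl]
        · have hstr : pvStripped (pvJ (pre.drop s)) :=
            pv_join_stripped hd (fun x hx => hpre x (List.mem_of_mem_drop hx))
          have hne : (pvJ (pre.drop s)).isEmpty = false := by
            simpa [List.isEmpty_eq_false_iff] using hstr.1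
          simp only [hne, Bool.not_false, if_true]
          exact pv_Y_append hstr.1 hl
      have hpre' : ∀ x ∈ pre ++ [l], pvStripped x := by
        intro x hx
        rcases List.mem_append.mp hx with hx | hx
        · exact hpre x hx
        · simp at hx; subst hx; exact hl
      have hsuf' : ∀ x ∈ rest, pvStripped x := fun x hx => hsuf x (by simp [hx])
      have hlen : ((pre ++ [l]).length : Int) = (pre.length : Int) + 1 := by
        simp [List.length_append]
      rw [PySem.List.enumerate_cons, List.foldl_cons, hstep]
      simp only [pvRef, hYC]
      by_cases hc : pvC l
      · simp only [hc, if_true]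
        rw [List.append_cons pre l rest, ← hlen,
          ih (pre ++ [l]) _ (pre ++ [l]).length le_rfl hsuf' hpre',
          List.drop_length]
        rw [← pv_join_drop_concat hpre s l,
          pv_strip_of_stripped (pv_stripped_join_drop hpre s l hl)]
        simp [pvJ, PySem.Chars.join_nil]
      · have hcf : pvC l = false := by simpa using hc
        simp only [hcf, Bool.false_eq_true, if_false]
        rw [List.append_cons pre l rest, ← hlen,
          ih (pre ++ [l]) g s (by simp [List.length_append]; omega) hsuf' hpre',
          List.drop_append_of_le_length hs, pv_join_drop_concat hpre s l]
lemma pv_cleaned_stripped (lines : List String) : ∀ l ∈ pvCleaned lines, pvStripped l := by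
  intro l hl
  simp only [pvCleaned, List.mem_filter, List.mem_map] at hl
  obtain ⟨⟨x, _, rfl⟩, hne⟩ := hl
  exact ⟨by simpa using hne, pv_strip_strip _⟩

lemma pv_B_eq (lines : List String) :
    group_lines_until_year_alt lines = pvRef (pvCleaned lines) [] := by
  have hrfl : group_lines_until_year_alt lines
      = pvFinB (pvCleaned lines)
          ((PySem.List.enumerate (pvCleaned lines) ((0 : Nat) : Int)).foldl
            (pvStepB (pvCleaned lines)) ([], ((0 : Nat) : Int))) := rfl
  rw [hrfl]
  have h := pv_B_ref (pvCleaned lines) [] [] 0 (by simp)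
    (pv_cleaned_stripped lines) (by simp)
  simpa [pvJ, PySem.Chars.join_nil] using h

-- ===== VERDICT (by name: the statement is the Claim_ definition above) =====
theorem group_lines_until_year_spec : Claim_equal_group_lines_until_year := by
  intro lines _
  show group_lines_until_year lines = group_lines_until_year_alt lines
  rw [pv_A_eq, pv_B_eq]
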